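-- pv_equiv track=rewrite | github.com/tmc/mlx-transformer-vm | mlx_transformer_vm/scheduler/deterministic.py | _alive_after
-- ===== SOURCE A (Python) =====
-- def _alive_after(num_layers, dim_birth, dim_death):
--     def alive_at(boundary):
--         return frozenset(
--             dimension
--             for dimension in dim_birth
--             if dimension in dim_death
--             and dim_birth[dimension] <= boundary
--             and dim_death[dimension] > boundary
--         )
--
--     alive = {}
--     for layer in range(num_layers):
--         for phase in (1, 3):
--             boundary = 4 * layer + phase
--             alive[boundary] = alive_at(boundary)
--     return alive
-- ===== SOURCE B (Python) =====
-- def _alive_after(num_layers, dim_birth, dim_death):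
--     # Inverted sweep: one pass over the dimensions; each dimension's alive
--     # interval [birth, death) is converted by arithmetic to a contiguous range
--     # of boundary indices k (boundary t = 2*k + 1) and appended to those buckets.
--     nb = 2 * num_layers
--     alive = {2 * k + 1: [] for k in range(nb)}
--     for d, b in dim_birth.items():
--         if d in dim_death:
--             e = dim_death[d]
--             k0 = max(0, -((1 - b) // 2))      # first k with 2*k+1 >= b
--             k1 = min(nb - 1, (e - 2) // 2)    # last k with 2*k+1 < e
--             for k in range(k0, k1 + 1):
--                 alive[2 * k + 1].append(d)
--     return {t: frozenset(ds) for t, ds in alive.items()}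
-- ===== Notes on version B (the rewrite author's own statement) =====
-- stated objective: faster
-- what changed: B inverts the loop structure: instead of rescanning every dimension at each of the 2*num_layers boundaries, it makes one pass over the dimensions, computes each dimension's contiguous range of alive boundary indices by integer arithmetic, and appends the dimension into pre-allocated per-boundary buckets.
import Mathlib
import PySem

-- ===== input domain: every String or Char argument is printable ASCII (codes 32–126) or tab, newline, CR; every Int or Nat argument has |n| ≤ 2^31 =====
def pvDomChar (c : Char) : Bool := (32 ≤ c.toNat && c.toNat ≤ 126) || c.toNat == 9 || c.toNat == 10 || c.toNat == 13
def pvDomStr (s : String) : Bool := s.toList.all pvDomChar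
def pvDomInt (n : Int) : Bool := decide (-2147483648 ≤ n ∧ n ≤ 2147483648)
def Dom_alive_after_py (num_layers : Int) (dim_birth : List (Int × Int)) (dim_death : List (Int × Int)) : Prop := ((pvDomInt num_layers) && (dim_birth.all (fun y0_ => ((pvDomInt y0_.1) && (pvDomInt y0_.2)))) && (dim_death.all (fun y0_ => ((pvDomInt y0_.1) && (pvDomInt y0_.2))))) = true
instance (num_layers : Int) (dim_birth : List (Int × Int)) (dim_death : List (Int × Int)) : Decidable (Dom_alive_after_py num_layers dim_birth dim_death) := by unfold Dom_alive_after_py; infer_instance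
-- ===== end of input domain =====

-- B inverts A's loop structure: one pass over the dimensions, turning each alive interval
-- into a contiguous range of boundary indices filled into pre-allocated buckets (faster by
-- a timing run: O(D + num_layers + total_alive) instead of A's per-boundary rescans).

-- ===== PORT A =====
-- A's `alive_at(boundary)`: frozenset of keys of dim_birth that are in dim_death and whose
-- birth ≤ boundary < death (the getD default 0 is never used: the key is present when looked up).
def pvAliveAtA (birth death : PySem.Dict Int Int) (boundary : Int) : List Int :=
  PySem.Set.ofList (birth.keys.filter (fun d =>
    death.contains d && decide (birth.getD d 0 ≤ boundary) && decide (boundary < death.getD d 0)))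

def alive_after_py (num_layers : Int) (dim_birth : List (Int × Int)) (dim_death : List (Int × Int)) : List (Int × List Int) :=
  let birth := PySem.Dict.ofList dim_birth
  let death := PySem.Dict.ofList dim_death
  -- alive = {}; for layer in range(num_layers): for phase in (1, 3): alive[4*layer+phase] = alive_at(...)
  let alive := (PySem.List.pyRange 0 num_layers 1).foldl (fun al layer =>
    [(1 : Int), 3].foldl (fun al phase =>
      al.insert (4 * layer + phase) (pvAliveAtA birth death (4 * layer + phase))) al)
    (PySem.Dict.empty)
  alive.items

-- ===== PORT B =====
-- nb = 2*num_layers; alive = {2*k+1: [] for k in range(nb)}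
-- for d, b in dim_birth.items():
--   if d in dim_death: e = dim_death[d]; k0 = max(0,-((1-b)//2)); k1 = min(nb-1,(e-2)//2)
--     for k in range(k0, k1+1): alive[2*k+1].append(d)
-- return {t: frozenset(ds) for t, ds in alive.items()}
def alive_after_py_alt (num_layers : Int) (dim_birth : List (Int × Int)) (dim_death : List (Int × Int)) : List (Int × List Int) :=
  let death := PySem.Dict.ofList dim_death
  let nb : Int := 2 * num_layers
  let alive0 : PySem.Dict Int (List Int) :=
    (List.range nb.toNat).foldl (fun d (k : Nat) => d.insert (2 * (k : Int) + 1) []) PySem.Dict.empty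
  let alive := (PySem.Dict.ofList dim_birth).items.foldl (fun al p =>
    if death.contains p.1 then
      let e := death.getD p.1 0
      let k0 := max 0 (-(PySem.Int.floordiv (1 - p.2) 2))
      let k1 := min (nb - 1) (PySem.Int.floordiv (e - 2) 2)
      (PySem.List.pyRange k0 (k1 + 1) 1).foldl
        (fun al k => al.modify (2 * k + 1) [] (· ++ [p.1])) al
    else al) alive0
  alive.items.map (fun q => (q.1, PySem.Set.ofList q.2))

-- ===== PRECONDITION & SPEC =====
def Spec_alive_after_py (num_layers : Int) (dim_birth : List (Int × Int)) (dim_death : List (Int × Int)) (out : List (Int × List Int)) : Prop := out = alive_after_py_alt num_layers dim_birth dim_death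
instance (num_layers : Int) (dim_birth : List (Int × Int)) (dim_death : List (Int × Int)) (out : List (Int × List Int)) : Decidable (Spec_alive_after_py num_layers dim_birth dim_death out) := by unfold Spec_alive_after_py; infer_instance

-- ===== CLAIM (what is proved, stated in full; the proofs are below) =====
def Claim_equal_alive_after_py : Prop := ∀ (num_layers : Int) (dim_birth : List (Int × Int)) (dim_death : List (Int × Int)), Dom_alive_after_py num_layers dim_birth dim_death → Spec_alive_after_py num_layers dim_birth dim_death (alive_after_py num_layers dim_birth dim_death)

-- ===== LEMMAS AND PROOFS =====

-- the per-item pair list B's flattened bucket-filling loop processes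
def pvPairs (death : PySem.Dict Int Int) (nb : Int) (p : Int × Int) : List (Int × Int) :=
  if death.contains p.1 then
    (PySem.List.pyRange (max 0 (-(PySem.Int.floordiv (1 - p.2) 2)))
      (min (nb - 1) (PySem.Int.floordiv (death.getD p.1 0 - 2) 2) + 1) 1).map
      (fun k => (2 * k + 1, p.1))
  else []

-- the alive condition at boundary t, as A tests it per item of dim_birth
def pvCond (death : PySem.Dict Int Int) (t : Int) (p : Int × Int) : Bool :=
  death.contains p.1 && decide (p.2 ≤ t) && decide (t < death.getD p.1 0)

theorem pyRange_one_nodup (a b : Int) : (PySem.List.pyRange a b 1).Nodup := by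
  rw [PySem.List.pyRange_one]
  exact List.Nodup.map (fun x y h => by omega) List.nodup_range

theorem pvKeys_pairs_mem (death : PySem.Dict Int Int) (nb : Int) (p : Int × Int)
    (c : Int) (hc : c ∈ (pvPairs death nb p).map (·.1)) :
    ∃ k : Nat, (k : Int) < nb ∧ c = 2 * (k : Int) + 1 := by
  unfold pvPairs at hc
  split at hc
  · simp only [List.map_map, List.mem_map, Function.comp_def] at hc
    obtain ⟨j, hj, rfl⟩ := hc
    rw [PySem.List.mem_pyRange_one] at hj
    exact ⟨j.toNat, by omega, by omega⟩
  · simp at hc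

theorem pvPairs_filter (death : PySem.Dict Int Int) (nb : Int) (p : Int × Int)
    (k : Nat) (hk : (k : Int) < nb) :
    ((pvPairs death nb p).filter (fun q => q.1 == 2 * (k : Int) + 1)).map (·.2)
      = if pvCond death (2 * (k : Int) + 1) p then [p.1] else [] := by
  unfold pvPairs pvCond
  by_cases hd : death.contains p.1
  · rw [if_pos hd, hd]
    simp only [Bool.true_and]
    rw [List.filter_map]
    have hpred : ((fun q : Int × Int => q.1 == 2 * (k : Int) + 1) ∘ (fun j => (2 * j + 1, p.1)))
        = (fun j : Int => j == (k : Int)) := by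
      funext j
      simp only [Function.comp_def]
      rw [show ((2 * j + 1 == 2 * (k : Int) + 1) : Bool) = decide (2 * j + 1 = 2 * (k:Int) + 1) from rfl,
        show ((j == (k : Int)) : Bool) = decide (j = (k:Int)) from rfl]
      rw [decide_eq_decide]
      omega
    rw [hpred, List.filter_beq]
    by_cases hc : (p.2 ≤ 2 * (k : Int) + 1 ∧ 2 * (k : Int) + 1 < death.getD p.1 0)
    · have hmem : (k : Int) ∈ PySem.List.pyRange (max 0 (-(PySem.Int.floordiv (1 - p.2) 2)))
          (min (nb - 1) (PySem.Int.floordiv (death.getD p.1 0 - 2) 2) + 1) 1 := by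
        rw [PySem.List.mem_pyRange_one]
        rw [PySem.Int.floordiv_eq_ediv_of_pos (by omega), PySem.Int.floordiv_eq_ediv_of_pos (by omega)]
        omega
      rw [List.count_eq_one_of_mem (pyRange_one_nodup _ _) hmem]
      simp [hc.1, hc.2]
    · have hmem : (k : Int) ∉ PySem.List.pyRange (max 0 (-(PySem.Int.floordiv (1 - p.2) 2)))
          (min (nb - 1) (PySem.Int.floordiv (death.getD p.1 0 - 2) 2) + 1) 1 := by
        rw [PySem.List.mem_pyRange_one]
        rw [PySem.Int.floordiv_eq_ediv_of_pos (by omega), PySem.Int.floordiv_eq_ediv_of_pos (by omega)]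
        omega
      rw [List.count_eq_zero.mpr hmem]
      split_ifs with h
      · simp only [Bool.and_eq_true, decide_eq_true_eq] at h
        exact absurd h hc
      · simp
  · rw [if_neg hd]
    have hb : (death.contains p.1 && decide (p.2 ≤ 2 * (k:Int) + 1)
        && decide (2 * (k:Int) + 1 < death.getD p.1 0)) = false := by
      simp [hd]
    rw [hb]
    simp

theorem pvInit_items (nb : Int) :
    ((List.range nb.toNat).foldl (fun d k => d.insert (2 * (k : Int) + 1) ([] : List Int))
      PySem.Dict.empty).items
      = (List.range nb.toNat).map (fun k : Nat => (2 * (k : Int) + 1, ([] : List Int))) := by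
  rw [PySem.Dict.items_foldl_insert_fresh (k := fun k : Nat => 2 * (k : Int) + 1) (v := fun _ => [])]
  · rfl
  · intro a _; exact PySem.Dict.contains_empty _
  · refine List.Nodup.map (fun a b h => by omega) List.nodup_range

theorem pvFlat_nat (n : Nat) :
    List.flatMap (fun l : Nat => ([4 * (l : Int) + 1, 4 * (l : Int) + 3] : List Int)) (List.range n)
      = List.map (fun k : Nat => 2 * (k : Int) + 1) (List.range (2 * n)) := by
  induction n with
  | zero => rfl
  | succ m ih =>
      rw [List.range_succ, List.flatMap_append, ih]
      have h2 : 2 * (m + 1) = (2 * m + 1) + 1 := by omega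
      rw [h2, List.range_succ, List.range_succ, List.map_append, List.map_append,
        List.append_assoc]
      simp only [List.flatMap_cons, List.flatMap_nil, List.map_cons, List.map_nil,
        List.append_nil, List.singleton_append]
      push_cast
      congr 1
      simp only [List.cons.injEq, and_true]
      constructor <;> ring

-- the list of boundaries A visits, in order, = [2*k+1 for k in range((2*num_layers).toNat)]
theorem pvBoundaries (L : Int) :
    (PySem.List.pyRange 0 L 1).flatMap (fun l => [4 * l + 1, 4 * l + 3])
      = (List.range (2 * L).toNat).map (fun k : Nat => 2 * (k : Int) + 1) := by
  rw [PySem.List.pyRange_one]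
  rw [List.flatMap_map]
  have h : 2 * (L - 0).toNat = (2 * L).toNat := by omega
  rw [← h, ← pvFlat_nat]
  apply List.flatMap_congr
  intro x _
  norm_num

-- per boundary, A's alive set = Set.ofList of the filtered first components of dim_birth's items
theorem pvAliveAt_eq (dim_birth : List (Int × Int)) (death : PySem.Dict Int Int) (t : Int) :
    pvAliveAtA (PySem.Dict.ofList dim_birth) death t
      = PySem.Set.ofList
          (((PySem.Dict.ofList dim_birth).items.filter (pvCond death t)).map (·.1)) := by
  rw [PySem.Dict.items_eq_map_keys (PySem.Dict.ofList dim_birth)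
    (PySem.Dict.nodup_keys_ofList dim_birth) 0]
  unfold pvAliveAtA pvCond
  congr 1
  simp only [List.filter_map, List.map_map, Function.comp_def]
  rw [List.map_id']

theorem pvFlatIf {α β : Type} (q : α → Bool) (f : α → β) (l : List α) :
    l.flatMap (fun a => if q a then [f a] else []) = (l.filter q).map f := by
  induction l with
  | nil => rfl
  | cons x xs ih =>
      simp only [List.flatMap_cons, List.filter_cons, ih]
      by_cases h : q x <;> simp [h]

-- B's final bucket at boundary 2*k+1
theorem pvBucket (dim_birth : List (Int × Int)) (death : PySem.Dict Int Int) (nb : Int)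
    (k : Nat) (hk : (k : Int) < nb) :
    (((PySem.Dict.ofList dim_birth).items.flatMap (pvPairs death nb)).filter
        (fun q => q.1 == 2 * (k : Int) + 1)).map (·.2)
      = (((PySem.Dict.ofList dim_birth).items.filter (pvCond death (2 * (k : Int) + 1))).map (·.1)) := by
  rw [List.filter_flatMap, List.map_flatMap]
  rw [List.flatMap_congr (g := fun p => if pvCond death (2 * (k : Int) + 1) p then [p.1] else [])
    (fun p _ => pvPairs_filter death nb p k hk)]
  exact pvFlatIf _ _ _

theorem alive_after_py_eq (num_layers : Int) (dim_birth dim_death : List (Int × Int)) :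
    alive_after_py num_layers dim_birth dim_death
      = alive_after_py_alt num_layers dim_birth dim_death := by
  have hbn : ((List.range (2 * num_layers).toNat).map (fun k : Nat => 2 * (k : Int) + 1)).Nodup :=
    List.Nodup.map (fun a b h => by omega) List.nodup_range
  have hk0 : ((List.range (2 * num_layers).toNat).foldl
      (fun d k => d.insert (2 * (k : Int) + 1) ([] : List Int)) PySem.Dict.empty).keys
      = (List.range (2 * num_layers).toNat).map (fun k : Nat => 2 * (k : Int) + 1) := by
    simp only [PySem.Dict.keys, pvInit_items, List.map_map]
    rfl
  unfold alive_after_py alive_after_py_alt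
  simp only []
  -- A side: flatten the nested layer/phase loops into one insert loop over the boundary list
  rw [PySem.List.foldl_congr_mem (PySem.List.pyRange 0 num_layers 1) _
    (fun al layer => ([4 * layer + 1, 4 * layer + 3] : List Int).foldl
      (fun al t => al.insert t
        (pvAliveAtA (PySem.Dict.ofList dim_birth) (PySem.Dict.ofList dim_death) t)) al)
    PySem.Dict.empty
    (fun al layer _ => by simp only [List.foldl_cons, List.foldl_nil])]
  rw [← List.foldl_flatMap, pvBoundaries]
  rw [PySem.Dict.items_foldl_insert_fresh _ (fun t => t) _ _
    (fun a _ => PySem.Dict.contains_empty a) (by simpa using hbn)]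
  rw [show (PySem.Dict.empty : PySem.Dict Int (List Int)).items = [] from rfl, List.nil_append]
  -- B side: the guarded inner bucket loop is the modify loop over pvPairs
  have hstep : (fun (al : PySem.Dict Int (List Int)) (p : Int × Int) =>
      if (PySem.Dict.ofList dim_death).contains p.1 then
        (PySem.List.pyRange (max 0 (-(PySem.Int.floordiv (1 - p.2) 2)))
          (min (2 * num_layers - 1)
            (PySem.Int.floordiv ((PySem.Dict.ofList dim_death).getD p.1 0 - 2) 2) + 1) 1).foldl
          (fun al k => al.modify (2 * k + 1) [] (· ++ [p.1])) al
      else al)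
      = (fun al p => (pvPairs (PySem.Dict.ofList dim_death) (2 * num_layers) p).foldl
          (fun al q => al.modify q.1 [] (· ++ [q.2])) al) := by
    funext al p
    unfold pvPairs
    split
    · rw [List.foldl_map]
    · rfl
  rw [hstep, ← List.foldl_flatMap]
  -- keys of the bucket dict do not change (every modified key is pre-allocated)
  have hkeys : (((PySem.Dict.ofList dim_birth).items.flatMap
        (pvPairs (PySem.Dict.ofList dim_death) (2 * num_layers))).foldl
        (fun al q => al.modify q.1 [] (· ++ [q.2]))
        ((List.range (2 * num_layers).toNat).foldl
          (fun d k => d.insert (2 * (k : Int) + 1) ([] : List Int)) PySem.Dict.empty)).keys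
      = (List.range (2 * num_layers).toNat).map (fun k : Nat => 2 * (k : Int) + 1) := by
    rw [PySem.Dict.keys_foldl_modify_key, hk0, PySem.Set.update_eq_append_filter]
    have hnil : ((PySem.Set.ofList (((PySem.Dict.ofList dim_birth).items.flatMap
          (pvPairs (PySem.Dict.ofList dim_death) (2 * num_layers))).map (·.1))).filter
          (fun y => !(PySem.Set.contains
            ((List.range (2 * num_layers).toNat).map (fun k : Nat => 2 * (k : Int) + 1)) y))) = [] := by
      rw [List.filter_eq_nil_iff]
      intro c hc
      rw [PySem.Set.mem_ofList, List.map_flatMap, List.mem_flatMap] at hc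
      obtain ⟨p, _, hcp⟩ := hc
      obtain ⟨k, hklt, rfl⟩ := pvKeys_pairs_mem _ _ _ _ hcp
      simp only [Bool.not_eq_true', Bool.not_eq_false]
      rw [PySem.Set.contains_iff]
      exact List.mem_map.mpr ⟨k, List.mem_range.mpr (by omega), rfl⟩
    rw [hnil, List.append_nil]
  have hnodup : (((PySem.Dict.ofList dim_birth).items.flatMap
        (pvPairs (PySem.Dict.ofList dim_death) (2 * num_layers))).foldl
        (fun al q => al.modify q.1 [] (· ++ [q.2]))
        ((List.range (2 * num_layers).toNat).foldl
          (fun d k => d.insert (2 * (k : Int) + 1) ([] : List Int)) PySem.Dict.empty)).keys.Nodup := by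
    rw [hkeys]; exact hbn
  rw [PySem.Dict.items_eq_map_keys _ hnodup ([] : List Int), hkeys]
  simp only [List.map_map]
  apply List.map_congr_left
  intro k hk
  simp only [Function.comp_def]
  congr 1
  -- the two alive sets at boundary 2*k+1 agree
  rw [pvAliveAt_eq dim_birth (PySem.Dict.ofList dim_death) (2 * (k : Int) + 1)]
  rw [PySem.Dict.getD_foldl_modify_append]
  have hmemit : ((2 * (k : Int) + 1), ([] : List Int)) ∈
      ((List.range (2 * num_layers).toNat).foldl
        (fun d (j : Nat) => d.insert (2 * (j : Int) + 1) ([] : List Int)) PySem.Dict.empty).items := by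
    rw [pvInit_items]
    exact List.mem_map.mpr ⟨k, hk, rfl⟩
  rw [PySem.Dict.getD_of_mem_items _ hmemit (by rw [hk0]; exact hbn) ([] : List Int), List.nil_append]
  rw [pvBucket dim_birth (PySem.Dict.ofList dim_death) (2 * num_layers) k
    (by rw [List.mem_range] at hk; omega)]

-- ===== VERDICT (by name: the statement is the Claim_ definition above) =====
theorem alive_after_py_spec : Claim_equal_alive_after_py := by
  intro num_layers dim_birth dim_death _
  unfold Spec_alive_after_py
  exact alive_after_py_eq num_layers dim_birth dim_death
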